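-- pv_equiv track=rewrite | github.com/Spectating101/nocturnal-archive | cite-agent-api/src/ingest/sec/sections.py | get_financial_statements
-- ===== SOURCE A (Python) =====
-- from typing import Dict, List
--
-- def get_financial_statements(sections: Dict[str, str]) -> str:
--     """
--     Extract financial statements discussion from sections
--
--     Args:
--         sections: Parsed sections dictionary
--
--     Returns:
--         str: Financial statements text
--     """
--     financial_keys = [
--         "item 8",
--         "financial statements",
--         "consolidated statements",
--         "financial condition"
--     ]
--
--     for key in financial_keys:
--         for section_title, content in sections.items():
--             if key in section_title.lower():
--                 return content
--
--     return ""
-- ===== SOURCE B (Python) =====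
-- from typing import Dict
--
-- def get_financial_statements(sections: Dict[str, str]) -> str:
--     """One pass over sections builds a key -> first-matching-content table,
--     then the priority list selects the answer."""
--     financial_keys = [
--         "item 8",
--         "financial statements",
--         "consolidated statements",
--         "financial condition"
--     ]
--     first_match = {}
--     for section_title, content in sections.items():
--         low = section_title.lower()
--         for key in financial_keys:
--             if key in low and key not in first_match:
--                 first_match[key] = content
--     for key in financial_keys:
--         if key in first_match:
--             return first_match[key]
--     return ""
-- ===== Notes on version B (the rewrite author's own statement) =====
-- stated objective: alternative
-- what changed: B makes a single pass over the sections building a key->first-matching-content dictionary, then selects by priority order, instead of rescanning all sections once per priority key.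
import Mathlib
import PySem

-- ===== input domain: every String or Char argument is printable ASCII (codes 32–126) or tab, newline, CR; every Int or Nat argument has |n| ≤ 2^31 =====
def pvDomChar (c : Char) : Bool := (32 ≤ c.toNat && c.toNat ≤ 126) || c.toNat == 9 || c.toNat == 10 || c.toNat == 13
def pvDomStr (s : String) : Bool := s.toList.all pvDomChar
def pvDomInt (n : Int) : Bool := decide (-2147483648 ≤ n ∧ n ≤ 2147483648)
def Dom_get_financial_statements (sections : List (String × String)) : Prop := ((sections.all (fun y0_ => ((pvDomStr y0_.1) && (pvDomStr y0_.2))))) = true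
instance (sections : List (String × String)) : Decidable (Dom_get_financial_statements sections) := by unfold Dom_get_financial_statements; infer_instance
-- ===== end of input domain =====

-- B replaces A's rescan-per-priority-key nesting by one pass building a key -> first-match table, then a priority lookup; same result, alternative structure.

-- the priority keyword list both Pythons hard-code
def pvKeys : List String :=
  ["item 8", "financial statements", "consolidated statements", "financial condition"]

-- ===== PORT A =====
-- A's inner loop: first section whose lowered title contains key
def pvInnerA (key : String) : List (String × String) → Option String
  | [] => none
  | (t, c) :: rest =>
      if PySem.Str.isIn key (PySem.Str.lower t) then some c else pvInnerA key rest

-- A's outer loop over the priority keys, with early return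
def pvOuterA (keys : List String) (sections : List (String × String)) : String :=
  match keys with
  | [] => ""
  | k :: ks =>
      match pvInnerA k sections with
      | some c => c
      | none => pvOuterA ks sections

def get_financial_statements (sections : List (String × String)) : String :=
  pvOuterA pvKeys sections

-- ===== PORT B =====
-- B's inner loop body: record content for each key contained in the lowered title, first match only
def pvStep (d : PySem.Dict String String) (tc : String × String) : PySem.Dict String String :=
  pvKeys.foldl
    (fun d k =>
      if PySem.Str.isIn k (PySem.Str.lower tc.1) && !(d.contains k) then d.insert k tc.2 else d)
    d

-- B's selection loop over the priority keys
def pvSelect (fm : PySem.Dict String String) : List String → String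
  | [] => ""
  | k :: ks =>
      match fm.get? k with
      | some c => c
      | none => pvSelect fm ks

def get_financial_statements_alt (sections : List (String × String)) : String :=
  let fm := sections.foldl pvStep PySem.Dict.empty
  pvSelect fm pvKeys

-- ===== PRECONDITION & SPEC =====
def Spec_get_financial_statements (sections : List (String × String)) (out : String) : Prop := out = get_financial_statements_alt sections
instance (sections : List (String × String)) (out : String) : Decidable (Spec_get_financial_statements sections out) := by unfold Spec_get_financial_statements; infer_instance

-- ===== CLAIM (what is proved, stated in full; the proofs are below) =====
def Claim_equal_get_financial_statements : Prop := ∀ (sections : List (String × String)), Dom_get_financial_statements sections → Spec_get_financial_statements sections (get_financial_statements sections)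

-- ===== LEMMAS AND PROOFS =====

-- effect of one section's inner key loop on a single lookup
theorem pv_inner_get? (L : List String) (d : PySem.Dict String String) (low c : String)
    (k : String) :
    (L.foldl
        (fun d k' => if PySem.Str.isIn k' low && !(d.contains k') then d.insert k' c else d)
        d).get? k
      = if k ∈ L ∧ PySem.Str.isIn k low then (d.get? k).or (some c) else d.get? k := by
  induction L generalizing d with
  | nil => simp
  | cons a t ih =>
      by_cases hak : k = a
      · subst hak
        by_cases hin : PySem.Chars.isIn k.toList low.toList = true
        · cases hc : d.contains k with
          | true =>
            obtain ⟨v, hg⟩ : ∃ v, d.get? k = some v := by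
              have h1 : (d.get? k).isSome := by
                rw [← PySem.Dict.contains_eq_isSome_get?]; exact hc
              exact Option.isSome_iff_exists.mp h1
            simp only [List.foldl_cons, ih]
            simp [hin, hc, hg, List.mem_cons]
          | false =>
            have hg : d.get? k = none := by
              cases hg : d.get? k with
              | none => rfl
              | some v =>
                exfalso
                have h1 : (d.get? k).isSome := by simp [hg]
                rw [← PySem.Dict.contains_eq_isSome_get?] at h1
                simp [hc] at h1
            simp only [List.foldl_cons, ih]
            simp [hin, hc, hg, List.mem_cons, PySem.Dict.get?_insert_self]
        · simp only [List.foldl_cons, ih]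
          simp [hin, List.mem_cons]
      · have hne : k ≠ a := hak
        have hx :
            ((if PySem.Str.isIn a low && !(d.contains a) then d.insert a c else d) :
                PySem.Dict String String).get? k = d.get? k := by
          split
          · exact PySem.Dict.get?_insert_of_ne _ _ hne
          · rfl
        simp only [List.foldl_cons, ih, hx]
        simp [List.mem_cons, hak]

-- one fold step, restated with pvStep
theorem pv_step_get? (d : PySem.Dict String String) (tc : String × String) (k : String)
    (hk : k ∈ pvKeys) :
    (pvStep d tc).get? k
      = (d.get? k).or (if PySem.Str.isIn k (PySem.Str.lower tc.1) then some tc.2 else none) := by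
  unfold pvStep
  rw [pv_inner_get?]
  by_cases hin : PySem.Chars.isIn k.toList (PySem.Chars.lower tc.1.toList) = true
  · simp [hk, hin]
  · simp [hin]

-- the whole fold computes A's inner search for every priority key
theorem pv_fold_get? (sections : List (String × String)) (d : PySem.Dict String String)
    (k : String) (hk : k ∈ pvKeys) :
    (sections.foldl pvStep d).get? k = (d.get? k).or (pvInnerA k sections) := by
  induction sections generalizing d with
  | nil => simp [pvInnerA]
  | cons tc rest ih =>
      obtain ⟨t, c⟩ := tc
      rw [List.foldl_cons, ih, pv_step_get? _ _ _ hk]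
      simp only [pvInnerA, Option.or_assoc]
      by_cases hin : PySem.Chars.isIn k.toList (PySem.Chars.lower t.toList) = true <;> simp [hin]

-- selection over any key list agrees with A's outer loop when lookups agree
theorem pv_select_eq (fm : PySem.Dict String String) (sections : List (String × String))
    (keys : List String) (h : ∀ k ∈ keys, fm.get? k = pvInnerA k sections) :
    pvSelect fm keys = pvOuterA keys sections := by
  induction keys with
  | nil => rfl
  | cons k ks ih =>
      simp only [pvSelect, pvOuterA, h k (List.mem_cons_self ..)]
      cases pvInnerA k sections with
      | none => exact ih fun k' hk' => h k' (List.mem_cons_of_mem _ hk')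
      | some c => rfl

-- ===== VERDICT (by name: the statement is the Claim_ definition above) =====
theorem get_financial_statements_spec : Claim_equal_get_financial_statements := by
  intro sections _
  unfold Spec_get_financial_statements get_financial_statements get_financial_statements_alt
  exact (pv_select_eq _ sections pvKeys fun k hk => by
    rw [pv_fold_get? sections PySem.Dict.empty k hk]; simp).symm
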